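-- pv_equiv track=rewrite | github.com/devnuller/edu-cpu | assembler.py | generate_hex
-- ===== SOURCE A (Python) =====
-- def generate_hex(output):
--     """Generate Intel HEX format from the output dict (addr -> byte)."""
--     if not output:
--         return ":00000001FF\n"
--     lines = []
--     # Collect addresses in order, emit up to 16 bytes per record
--     addrs = sorted(output.keys())
--     i = 0
--     while i < len(addrs):
--         base = addrs[i]
--         data = []
--         # Gather contiguous bytes, up to 16 per record
--         while i < len(addrs) and addrs[i] == base + len(data) and len(data) < 16:
--             data.append(output[addrs[i]])
--             i += 1
--         # Data record: :LLAAAATT[DD...]CC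
--         length = len(data)
--         addr_hi = (base >> 8) & 0xFF
--         addr_lo = base & 0xFF
--         record = [length, addr_hi, addr_lo, 0x00] + data
--         checksum = (~sum(record) + 1) & 0xFF
--         hex_str = "".join(f"{b:02X}" for b in record) + f"{checksum:02X}"
--         lines.append(f":{hex_str}")
--     # EOF record
--     lines.append(":00000001FF")
--     return "\n".join(lines) + "\n"
-- ===== SOURCE B (Python) =====
-- def generate_hex(output):
--     """Generate Intel HEX format from the output dict (addr -> byte)."""
--     if not output:
--         return ":00000001FF\n"
--     # Phase 1: maximal contiguous runs of the sorted addresses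
--     addrs = sorted(output)
--     runs = []
--     run = [addrs[0]]
--     for a in addrs[1:]:
--         if a == run[-1] + 1:
--             run.append(a)
--         else:
--             runs.append(run)
--             run = [a]
--     runs.append(run)
--     # Phase 2: slice each run into 16-byte chunks and emit one record per chunk
--     lines = []
--     for run in runs:
--         while run:
--             chunk, run = run[:16], run[16:]
--             base = chunk[0]
--             data = [output[a] for a in chunk]
--             record = [len(data), (base >> 8) & 0xFF, base & 0xFF, 0x00] + data
--             checksum = (~sum(record) + 1) & 0xFF
--             lines.append(":" + "".join(f"{b:02X}" for b in record) + f"{checksum:02X}")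
--     lines.append(":00000001FF")
--     return "\n".join(lines) + "\n"
-- ===== Notes on version B (the rewrite author's own statement) =====
-- stated objective: alternative
-- what changed: A walks the sorted addresses with one index-driven while loop whose inner loop simultaneously enforces contiguity and the 16-byte record cap; B first splits the sorted addresses into maximal contiguous runs and then slices each run into 16-byte chunks, emitting one record per chunk.
import Mathlib
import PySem

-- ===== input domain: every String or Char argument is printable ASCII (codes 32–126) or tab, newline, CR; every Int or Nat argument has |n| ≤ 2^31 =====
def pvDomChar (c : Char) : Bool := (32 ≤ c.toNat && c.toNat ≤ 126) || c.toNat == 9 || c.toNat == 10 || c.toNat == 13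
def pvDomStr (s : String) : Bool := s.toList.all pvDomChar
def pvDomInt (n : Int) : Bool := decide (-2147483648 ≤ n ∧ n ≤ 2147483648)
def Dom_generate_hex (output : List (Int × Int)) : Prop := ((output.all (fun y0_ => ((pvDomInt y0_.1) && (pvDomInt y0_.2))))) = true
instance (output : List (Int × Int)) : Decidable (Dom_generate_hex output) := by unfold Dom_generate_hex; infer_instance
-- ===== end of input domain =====

-- B restructures A's single index-walking while-loop into two phases (maximal contiguous
-- runs of the sorted addresses, then 16-byte chunks per run); objective: alternative
-- decomposition, same asymptotic cost.

-- Hand-port of Python's f"{b:02X}" for an arbitrary int (no PySem primitive): uppercase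
-- hex digits, zero-padded to width 2 (the sign counts towards the width). Exact for all
-- ints; a shared language-primitive helper used by both ports.
def pvHexDigit (n : Nat) : Char :=
  if n < 10 then Char.ofNat (48 + n) else Char.ofNat (55 + n)

def pvToHex (n : Nat) : List Char :=
  if h : n < 16 then [pvHexDigit n]
  else pvToHex (n / 16) ++ [pvHexDigit (n % 16)]
decreasing_by exact Nat.div_lt_self (by omega) (by omega)

def pvFmt02X (b : Int) : String :=
  if b < 0 then String.mk ('-' :: pvToHex (-b).toNat)
  else
    let s := pvToHex b.toNat
    String.mk (if s.length < 2 then '0' :: s else s)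

-- ===== PORT A =====
-- Python dict lookup output[a] (a always a key of output; Lean dict = assoc list, first match):
-- inner while loop of A, gathering contiguous bytes (up to 16) into data; returns (data, rest of addrs)
def pvGather (o : List (Int × Int)) (base : Int) (data : List Int) : List Int → List Int × List Int
  | [] => (data, [])
  | a :: rest =>
    if a = base + (data.length : Int) ∧ data.length < 16 then
      pvGather o base (data ++ [(List.lookup a o).getD 0]) rest
    else (data, a :: rest)

theorem pvGather_snd_length_le (o : List (Int × Int)) :
    ∀ (rest : List Int) (base : Int) (data : List Int),
      (pvGather o base data rest).2.length ≤ rest.length := by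
  intro rest
  induction rest with
  | nil => intro base data; simp [pvGather]
  | cons a tl ih =>
    intro base data
    simp only [pvGather]
    split
    · exact Nat.le_succ_of_le (ih _ _)
    · simp

-- A's record formatting for one data record (the body of the outer while loop after the gather):
-- '>> 8' is floor division by 256 and '& 0xFF' is floor-mod 256, exact for every int.
def pvRecordLine (base : Int) (data : List Int) : String :=
  let length : Int := data.length
  let addr_hi := PySem.Int.mod (PySem.Int.floordiv base 256) 256
  let addr_lo := PySem.Int.mod base 256
  let record := [length, addr_hi, addr_lo, 0] ++ data
  let checksum := PySem.Int.mod ((-1 - record.sum) + 1) 256  -- (~sum(record) + 1) & 0xFF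
  ":" ++ String.join (record.map pvFmt02X) ++ pvFmt02X checksum

-- A's outer while loop over the remaining suffix of addrs; the first inner-loop iteration
-- always fires (addrs[i] = base + len([]) and 0 < 16), so it is taken before recursing.
def pvALoop (o : List (Int × Int)) : List Int → List String
  | [] => []
  | base :: tl =>
    let g := pvGather o base [(List.lookup base o).getD 0] tl
    pvRecordLine base g.1 :: pvALoop o g.2
termination_by l => l.length
decreasing_by
  exact Nat.lt_succ_of_le (pvGather_snd_length_le o tl base [(List.lookup base o).getD 0])

def generate_hex (output : List (Int × Int)) : String :=
  if output = [] then ":00000001FF\n"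
  else
    let addrs := PySem.List.sorted (PySem.List.dedup (output.map Prod.fst)) (fun x => x) false
    let lines := pvALoop output addrs
    PySem.Str.join "\n" (lines ++ [":00000001FF"]) ++ "\n"

-- ===== PORT B =====
-- phase 1 of Source B: split the sorted addresses into maximal contiguous runs
-- (run[-1] is run.getLastD 0: run is never empty)
def pvRunsAux : List Int → List Int → List (List Int)
  | run, [] => [run]
  | run, a :: tl =>
    if a = run.getLastD 0 + 1 then pvRunsAux (run ++ [a]) tl
    else run :: pvRunsAux [a] tl

-- phase 2 of Source B: 'while run: chunk, run = run[:16], run[16:]'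
def pvChunks : List Int → List (List Int)
  | [] => []
  | a :: tl => ((a :: tl).take 16) :: pvChunks ((a :: tl).drop 16)
termination_by l => l.length
decreasing_by simp

-- record emission for one chunk (chunk[0] via headD: chunks are never empty)
def pvChunkLine (o : List (Int × Int)) (chunk : List Int) : String :=
  let base := chunk.headD 0
  let data := chunk.map (fun a => (List.lookup a o).getD 0)
  let record := [(data.length : Int),
                 PySem.Int.mod (PySem.Int.floordiv base 256) 256,
                 PySem.Int.mod base 256, 0] ++ data
  let checksum := PySem.Int.mod ((-1 - record.sum) + 1) 256
  ":" ++ String.join (record.map pvFmt02X) ++ pvFmt02X checksum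

def generate_hex_alt (output : List (Int × Int)) : String :=
  if output = [] then ":00000001FF\n"
  else
    let addrs := PySem.List.sorted (PySem.List.dedup (output.map Prod.fst)) (fun x => x) false
    let runs := pvRunsAux [addrs.headD 0] (addrs.drop 1)
    let lines := runs.flatMap (fun run => (pvChunks run).map (pvChunkLine output))
    PySem.Str.join "\n" (lines ++ [":00000001FF"]) ++ "\n"

-- ===== PRECONDITION & SPEC =====
def Spec_generate_hex (output : List (Int × Int)) (out : String) : Prop := out = generate_hex_alt output
instance (output : List (Int × Int)) (out : String) : Decidable (Spec_generate_hex output out) := by unfold Spec_generate_hex; infer_instance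

-- ===== CLAIM (what is proved, stated in full; the proofs are below) =====
def Claim_equal_generate_hex : Prop := ∀ (output : List (Int × Int)), Dom_generate_hex output → Spec_generate_hex output (generate_hex output)

-- ===== LEMMAS AND PROOFS =====

-- the maximal prefix of l of the form c, c+1, c+2, …, and the rest
def takeC (c : Int) : List Int → List Int
  | [] => []
  | a :: tl => if a = c then a :: takeC (c + 1) tl else []

def dropC (c : Int) : List Int → List Int
  | [] => []
  | a :: tl => if a = c then dropC (c + 1) tl else a :: tl

theorem takeC_append_dropC (l : List Int) : ∀ c : Int, takeC c l ++ dropC c l = l := by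
  induction l with
  | nil => intro c; simp [takeC, dropC]
  | cons a tl ih =>
    intro c
    by_cases h : a = c <;> simp [takeC, dropC, h, ih]

theorem takeC_idem (l : List Int) : ∀ c : Int, takeC c (takeC c l) = takeC c l := by
  induction l with
  | nil => intro c; simp [takeC]
  | cons a tl ih =>
    intro c
    by_cases h : a = c <;> simp [takeC, h]
    simpa [takeC, h] using ih (c + 1)

theorem dropC_not_cont (l : List Int) :
    ∀ c : Int, takeC (c + ((takeC c l).length : Int)) (dropC c l) = [] := by
  induction l with
  | nil => intro c; simp [takeC, dropC]
  | cons a tl ih =>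
    intro c
    by_cases h : a = c
    · simp only [takeC, dropC, if_pos h, List.length_cons]
      have := ih (c + 1)
      convert this using 2
      push_cast; ring
    · simp [takeC, dropC, h]

theorem takeC_drop (n : Nat) : ∀ (l : List Int) (c : Int),
    takeC c l = l → takeC (c + (n : Int)) (l.drop n) = l.drop n := by
  induction n with
  | zero => intro l c h; simpa using h
  | succ m ih =>
    intro l c h
    cases l with
    | nil => simp [takeC]
    | cons a tl =>
      simp only [takeC] at h
      by_cases ha : a = c
      · rw [if_pos ha] at h
        have h2 : takeC (c + 1) tl = tl := (List.cons.injEq _ _ _ _ ▸ h).2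
        have := ih tl (c + 1) h2
        simpa [show c + ((m : Int) + 1) = c + 1 + (m : Int) by ring] using this
      · rw [if_neg ha] at h; exact absurd h (by simp)

theorem takeC_append (S : List Int) : ∀ (D : List Int) (c : Int),
    takeC c S = S → takeC (c + (S.length : Int)) D = [] →
    takeC c (S ++ D) = S ∧ dropC c (S ++ D) = D := by
  induction S with
  | nil =>
    intro D c _ hD
    simp at hD
    cases D with
    | nil => simp [takeC, dropC]
    | cons a tl =>
      simp only [takeC] at hD
      by_cases ha : a = c
      · rw [if_pos ha] at hD; exact absurd hD (by simp)
      · simp [takeC, dropC, ha]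
  | cons s S' ih =>
    intro D c hS hD
    simp only [takeC] at hS
    by_cases hs : s = c
    · rw [if_pos hs] at hS
      have h2 : takeC (c + 1) S' = S' := (List.cons.injEq _ _ _ _ ▸ hS).2
      have hD' : takeC (c + 1 + (S'.length : Int)) D = [] := by
        convert hD using 2
        push_cast [List.length_cons]; ring
      obtain ⟨h3, h4⟩ := ih D (c + 1) h2 hD'
      constructor <;> simp [takeC, dropC, hs, h3, h4]
    · rw [if_neg hs] at hS; exact absurd hS (by simp)

-- characterisation of A's inner gather loop
theorem gather_eq (o : List (Int × Int)) :
    ∀ (rest : List Int) (b : Int) (data : List Int), data.length ≤ 16 →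
    pvGather o b data rest =
      (data ++ ((takeC (b + (data.length : Int)) rest).take (16 - data.length)).map
          (fun a => (List.lookup a o).getD 0),
       ((takeC (b + (data.length : Int)) rest).drop (16 - data.length)) ++
          dropC (b + (data.length : Int)) rest) := by
  intro rest
  induction rest with
  | nil => intro b data h; simp [pvGather, takeC, dropC]
  | cons a tl ih =>
    intro b data h
    simp only [pvGather]
    by_cases ha : a = b + (data.length : Int)
    · by_cases hlen : data.length < 16
      · rw [if_pos ⟨ha, hlen⟩]
        have h1 : (data ++ [(List.lookup a o).getD 0]).length ≤ 16 := by
          simp; omega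
        rw [ih b _ h1]
        have harith : b + (((data ++ [(List.lookup a o).getD 0]).length : Nat) : Int)
            = b + (data.length : Int) + 1 := by
          push_cast [List.length_append, List.length_cons, List.length_nil]; ring
        have htk : takeC (b + (data.length : Int)) (a :: tl)
            = a :: takeC (b + (data.length : Int) + 1) tl := by
          simp [takeC, ha]
        have hdr : dropC (b + (data.length : Int)) (a :: tl)
            = dropC (b + (data.length : Int) + 1) tl := by
          simp [dropC, ha]
        rw [harith, htk, hdr]
        have h16 : 16 - data.length = (16 - (data.length + 1)) + 1 := by omega
        simp only [Prod.mk.injEq]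
        constructor
        · rw [h16]
          simp [List.take_succ_cons, ha]
        · rw [h16]
          simp [List.drop_succ_cons]
      · rw [if_neg (by tauto)]
        have h16 : 16 - data.length = 0 := by omega
        rw [h16]
        simp [takeC_append_dropC]
    · rw [if_neg (by tauto)]
      simp [takeC, dropC, ha]

def pvRunsList : List Int → List (List Int)
  | [] => []
  | a :: tl => pvRunsAux [a] tl

theorem runsAux_eq : ∀ (rest run : List Int), run ≠ [] →
    pvRunsAux run rest =
      (run ++ takeC (run.getLastD 0 + 1) rest) :: pvRunsList (dropC (run.getLastD 0 + 1) rest) := by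
  intro rest
  induction rest with
  | nil => intro run _; simp [pvRunsAux, takeC, dropC, pvRunsList]
  | cons a tl ih =>
    intro run hne
    simp only [pvRunsAux]
    by_cases ha : a = run.getLastD 0 + 1
    · rw [if_pos ha, ih (run ++ [a]) (by simp)]
      have hlast : (run ++ [a]).getLastD 0 = a := by
        simp
      rw [hlast]
      simp [takeC, dropC, ha]
    · rw [if_neg ha]
      have htk : takeC (run.getLastD 0 + 1) (a :: tl) = [] := by
        rw [takeC, if_neg ha]
      have hdr : dropC (run.getLastD 0 + 1) (a :: tl) = a :: tl := by
        rw [dropC, if_neg ha]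
      rw [htk, hdr, List.append_nil]
      rfl

theorem chunkLine_eq (o : List (Int × Int)) (a : Int) (r : List Int) :
    pvChunkLine o (a :: r)
      = pvRecordLine a ((a :: r).map (fun x => (List.lookup x o).getD 0)) := by
  simp [pvChunkLine, pvRecordLine, Function.comp_def]

def pvRunsLines (o : List (Int × Int)) (l : List Int) : List String :=
  (pvRunsList l).flatMap (fun run => (pvChunks run).map (pvChunkLine o))

theorem pvChunks_nil : pvChunks [] = [] := by rw [pvChunks]

theorem pvChunks_cons (a : Int) (tl : List Int) :
    pvChunks (a :: tl) = ((a :: tl).take 16) :: pvChunks ((a :: tl).drop 16) := by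
  rw [pvChunks]

-- the step both cases of the main induction share: one record is emitted for the first
-- 16 elements of the current run T (preceded by base a), and the loop continues on
-- T.drop 15 ++ Dd.
theorem main_loop : ∀ (n : Nat) (S D : List Int) (o : List (Int × Int)) (c : Int),
    S.length + D.length ≤ n → takeC c S = S →
    (S = [] ∨ takeC (c + (S.length : Int)) D = []) →
    pvALoop o (S ++ D) = (pvChunks S).map (pvChunkLine o) ++ pvRunsLines o D := by
  intro n
  induction n with
  | zero =>
    intro S D o c hlen _ _
    have hS : S = [] := by cases S <;> simp_all
    have hD : D = [] := by cases D <;> simp_all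
    subst hS; subst hD
    simp [pvALoop, pvChunks_nil, pvRunsLines, pvRunsList]
  | succ m ih =>
    intro S D o c hlen hcons hcont
    -- both cases reduce to: head a, current run tail T (consecutive from a+1),
    -- remainder Dd with takeC (a+1+|T|) Dd = []
    have key : ∀ (a : Int) (T Dd : List Int),
        T.length + Dd.length ≤ m → takeC (a + 1) T = T →
        takeC (a + 1 + (T.length : Int)) Dd = [] →
        pvALoop o (a :: (T ++ Dd)) =
          (pvChunkLine o (a :: T.take 15)) ::
            ((pvChunks (T.drop 15)).map (pvChunkLine o) ++ pvRunsLines o Dd) := by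
      intro a T Dd hlen' hT hDd
      have hTD := takeC_append T Dd (a + 1) hT hDd
      rw [show pvALoop o (a :: (T ++ Dd)) =
          pvRecordLine a (pvGather o a [(List.lookup a o).getD 0] (T ++ Dd)).1 ::
            pvALoop o (pvGather o a [(List.lookup a o).getD 0] (T ++ Dd)).2 from by
        simp [pvALoop]]
      rw [gather_eq o (T ++ Dd) a [(List.lookup a o).getD 0] (by simp)]
      simp only [List.length_cons, List.length_nil]
      rw [show a + ((1 : Nat) : Int) = a + 1 by norm_num, hTD.1, hTD.2]
      simp only [List.singleton_append, show 16 - (0 + 1) = 15 from rfl]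
      rw [chunkLine_eq, List.map_cons]
      refine congrArg₂ List.cons rfl ?_
      · -- the continuation
        by_cases hdrop : T.drop 15 = []
        · rw [hdrop]
          simp only [List.nil_append, pvChunks, List.map_nil, List.nil_append]
          have := ih [] Dd o 0 (by simp; omega) (by simp [takeC]) (Or.inl rfl)
          simpa [pvChunks_nil] using this
        · have hTlen : 15 < T.length := by
            by_contra hc
            exact hdrop (List.drop_eq_nil_of_le (by omega))
          have hconsd : takeC (a + 1 + (15 : Int)) (T.drop 15) = T.drop 15 := by
            have := takeC_drop 15 T (a + 1) hT
            simpa using this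
          have hcontd : takeC ((a + 1 + 15) + ((T.drop 15).length : Int)) Dd = [] := by
            have hl : (T.drop 15).length = T.length - 15 := by simp
            rw [hl]
            convert hDd using 2
            push_cast [Nat.cast_sub (le_of_lt hTlen)]
            ring
          have := ih (T.drop 15) Dd o (a + 1 + 15)
            (by simp; omega) hconsd (Or.inr hcontd)
          simpa using this
    cases S with
    | nil =>
      simp only [List.nil_append, pvChunks_nil, List.map_nil, List.nil_append]
      cases D with
      | nil => simp [pvALoop, pvRunsLines, pvRunsList]
      | cons a tl =>
        have hdec := takeC_append_dropC tl (a + 1)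
        have hcont' : takeC (a + 1 + ((takeC (a + 1) tl).length : Int)) (dropC (a + 1) tl) = [] :=
          dropC_not_cont tl (a + 1)
        have hT : takeC (a + 1) (takeC (a + 1) tl) = takeC (a + 1) tl := takeC_idem tl (a + 1)
        have hlen' : (takeC (a + 1) tl).length + (dropC (a + 1) tl).length ≤ m := by
          have : (takeC (a + 1) tl).length + (dropC (a + 1) tl).length = tl.length := by
            rw [← List.length_append, hdec]
          simp at hlen; omega
        have hk := key a (takeC (a + 1) tl) (dropC (a + 1) tl) hlen' hT hcont'
        rw [hdec] at hk
        rw [hk]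
        -- right-hand side: unfold pvRunsLines on a :: tl
        unfold pvRunsLines
        rw [show pvRunsList (a :: tl) = pvRunsAux [a] tl from rfl,
          runsAux_eq tl [a] (by simp)]
        rw [show ([a] : List Int).getLastD 0 = a from rfl]
        simp only [List.flatMap_cons, List.singleton_append, pvChunks_cons]
        simp only [List.take_succ_cons, List.drop_succ_cons, List.map_cons, List.cons_append]
    | cons s S' =>
      -- from takeC c (s :: S') = s :: S': s = c and S' consecutive from c + 1
      have hs : s = c ∧ takeC (c + 1) S' = S' := by
        simp only [takeC] at hcons
        by_cases h : s = c
        · rw [if_pos h] at hcons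
          exact ⟨h, (List.cons.injEq _ _ _ _ ▸ hcons).2⟩
        · rw [if_neg h] at hcons; exact absurd hcons (by simp)
      have hcont' : takeC (s + 1 + (S'.length : Int)) D = [] := by
        rcases hcont with h | h
        · exact absurd h (by simp)
        · rw [hs.1]; convert h using 2; push_cast [List.length_cons]; ring
      have hlen' : S'.length + D.length ≤ m := by simp at hlen; omega
      have hk := key s S' D hlen' (hs.1 ▸ hs.2) hcont'
      rw [List.cons_append, hk]
      rw [pvChunks_cons]
      simp only [List.take_succ_cons, List.drop_succ_cons, List.map_cons, List.cons_append]

-- sorted(dedup) of a nonempty list is nonempty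
theorem addrs_ne_nil (output : List (Int × Int)) (h : output ≠ []) :
    PySem.List.sorted (PySem.List.dedup (output.map Prod.fst)) (fun x => x) false ≠ [] := by
  intro hd
  rw [PySem.List.sorted_eq_nil_iff] at hd
  cases output with
  | nil => exact absurd rfl h
  | cons p tl =>
    have hm : p.1 ∈ PySem.List.dedup ((p :: tl).map Prod.fst) := by
      rw [PySem.List.mem_dedup]; simp
    rw [hd] at hm
    simp at hm

-- ===== VERDICT (by name: the statement is the Claim_ definition above) =====
theorem generate_hex_spec : Claim_equal_generate_hex := by
  intro output _
  unfold Spec_generate_hex generate_hex generate_hex_alt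
  by_cases h : output = []
  · simp [h]
  · rw [if_neg h, if_neg h]
    cases hX : PySem.List.sorted (PySem.List.dedup (output.map Prod.fst)) (fun x => x) false with
    | nil => exact absurd hX (addrs_ne_nil output h)
    | cons a tl =>
      have hmain := main_loop (a :: tl).length [] (a :: tl) output 0
        (by simp) (by simp [takeC]) (Or.inl rfl)
      simp only [List.nil_append, pvChunks_nil, List.map_nil] at hmain
      simp only [List.headD_cons, List.drop_one, List.tail_cons]
      rw [hmain]
      rfl
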